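-- pv_equiv track=rewrite | github.com/NASA-IMPACT/nasa-apt | app/pdf/serialize.py | addMarkup
-- ===== SOURCE A (Python) =====
-- def addMarkup(text, marks):
--     for mark in marks:
--         markupType = mark["type"]
--         if markupType == "italic":
--             text = f"\\textit{{{text}}}"
--         elif markupType == "bold":
--             text = f"\\textbf{{{text}}}"
--         elif markupType == "underline":
--             text = f"\\underline{{{text}}}"
--         elif markupType == "subscript":
--             text = f"\\textsubscript{{{text}}}"
--         elif markupType == "superscript":
--             text = f"\\textsuperscript{{{text}}}"
--     return text
-- ===== SOURCE B (Python) =====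
-- _CMDS = {
--     "italic": "\\textit",
--     "bold": "\\textbf",
--     "underline": "\\underline",
--     "subscript": "\\textsubscript",
--     "superscript": "\\textsuperscript",
-- }
--
-- def addMarkup(text, marks):
--     prefix = ""
--     closes = 0
--     for mark in marks:
--         cmd = _CMDS.get(mark["type"])
--         if cmd is not None:
--             prefix = cmd + "{" + prefix
--             closes += 1
--     return prefix + text + "}" * closes
-- ===== Notes on version B (the rewrite author's own statement) =====
-- stated objective: alternative
-- what changed: Instead of re-wrapping the whole string once per mark, B makes one pass accumulating a prefix of opening commands (from a type-to-command table) and a count of closing braces, then concatenates prefix + text + '}'*count.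
import Mathlib
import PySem

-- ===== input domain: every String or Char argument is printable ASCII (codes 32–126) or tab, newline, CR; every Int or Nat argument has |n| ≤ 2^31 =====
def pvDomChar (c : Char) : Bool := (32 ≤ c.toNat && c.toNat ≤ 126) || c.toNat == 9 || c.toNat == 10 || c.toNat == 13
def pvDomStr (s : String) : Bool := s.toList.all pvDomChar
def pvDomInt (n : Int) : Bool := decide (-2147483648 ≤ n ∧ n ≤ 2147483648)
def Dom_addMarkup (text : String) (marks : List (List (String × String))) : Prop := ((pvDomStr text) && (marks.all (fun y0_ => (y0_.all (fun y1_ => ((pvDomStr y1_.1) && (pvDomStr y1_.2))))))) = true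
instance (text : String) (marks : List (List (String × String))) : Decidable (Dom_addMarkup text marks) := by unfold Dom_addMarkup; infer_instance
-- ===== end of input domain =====

-- B replaces A's per-mark re-wrapping of the whole string by one pass accumulating a
-- prefix of opening commands and a count of closing braces, concatenated once at the end.

-- ===== PORT A =====
-- mark["type"] on a Python dict: first match in the association list (KeyError = none, excluded by Pre_).
def pvLookupType (mark : List (String × String)) : Option String :=
  (PySem.Dict.mk mark).get? "type"

-- literal transliteration of A: fold over marks, each step rewrapping the whole text.
-- (on a mark without a "type" key Python raises KeyError; Pre_ excludes that, the port leaves text unchanged there)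
def addMarkup (text : String) (marks : List (List (String × String))) : String :=
  marks.foldl (fun text mark =>
    match pvLookupType mark with
    | none => text
    | some markupType =>
      if markupType = "italic" then "\\textit{" ++ text ++ "}"
      else if markupType = "bold" then "\\textbf{" ++ text ++ "}"
      else if markupType = "underline" then "\\underline{" ++ text ++ "}"
      else if markupType = "subscript" then "\\textsubscript{" ++ text ++ "}"
      else if markupType = "superscript" then "\\textsuperscript{" ++ text ++ "}"
      else text) text

-- ===== PORT B =====
def pvCmds : PySem.Dict String String :=
  PySem.Dict.ofList [("italic", "\\textit"), ("bold", "\\textbf"), ("underline", "\\underline"),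
                     ("subscript", "\\textsubscript"), ("superscript", "\\textsuperscript")]

-- "}" * n
def pvCloses : Nat → String
  | 0 => ""
  | n + 1 => pvCloses n ++ "}"

-- transliteration of B: single pass building (prefix, closes), then one concatenation.
def addMarkup_alt (text : String) (marks : List (List (String × String))) : String :=
  let st := marks.foldl (fun (st : String × Nat) mark =>
    match pvLookupType mark with
    | none => st
    | some ty =>
      match pvCmds.get? ty with
      | none => st
      | some cmd => (cmd ++ "{" ++ st.1, st.2 + 1)) ("", 0)
  st.1 ++ text ++ pvCloses st.2

-- ===== PRECONDITION & SPEC =====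
-- Pre_ excludes exactly the inputs where Python raises KeyError: a mark without a "type" key.
def Pre_addMarkup (text : String) (marks : List (List (String × String))) : Prop :=
  ∀ mark ∈ marks, ((PySem.Dict.mk mark).get? "type").isSome = true
instance (text : String) (marks : List (List (String × String))) : Decidable (Pre_addMarkup text marks) := by unfold Pre_addMarkup; infer_instance

def pvWitness_addMarkup : String × (List (List (String × String))) :=
  ("hi", [[("type", "bold")], [("type", "zap")]])

def Spec_addMarkup (text : String) (marks : List (List (String × String))) (out : String) : Prop := out = addMarkup_alt text marks
instance (text : String) (marks : List (List (String × String))) (out : String) : Decidable (Spec_addMarkup text marks out) := by unfold Spec_addMarkup; infer_instance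

-- ===== CLAIM (what is proved, stated in full; the proofs are below) =====
def Claim_equal_addMarkup : Prop := ∀ (text : String) (marks : List (List (String × String))), Dom_addMarkup text marks → Pre_addMarkup text marks → Spec_addMarkup text marks (addMarkup text marks)

-- ===== LEMMAS AND PROOFS =====

-- Invariant: running A's fold on p ++ text ++ "}"*c equals B's fold started from (p, c).
theorem addMarkup_invariant (marks : List (List (String × String))) :
    ∀ (p text : String) (c : Nat),
    marks.foldl (fun text mark =>
      match pvLookupType mark with
      | none => text
      | some markupType =>
        if markupType = "italic" then "\\textit{" ++ text ++ "}"
        else if markupType = "bold" then "\\textbf{" ++ text ++ "}"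
        else if markupType = "underline" then "\\underline{" ++ text ++ "}"
        else if markupType = "subscript" then "\\textsubscript{" ++ text ++ "}"
        else if markupType = "superscript" then "\\textsuperscript{" ++ text ++ "}"
        else text) (p ++ text ++ pvCloses c) =
    (let st := marks.foldl (fun (st : String × Nat) mark =>
      match pvLookupType mark with
      | none => st
      | some ty =>
        match pvCmds.get? ty with
        | none => st
        | some cmd => (cmd ++ "{" ++ st.1, st.2 + 1)) (p, c)
     st.1 ++ text ++ pvCloses st.2) := by
  induction marks with
  | nil => intro p text c; rfl
  | cons mark rest ih =>
    intro p text c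
    simp only [List.foldl_cons]
    cases h : pvLookupType mark with
    | none => simpa using ih p text c
    | some ty =>
      by_cases h1 : ty = "italic"
      · subst h1
        have := ih ("\\textit{" ++ p) text (c + 1)
        simp only [pvCloses] at this ⊢
        simp only [← String.append_assoc] at this ⊢
        exact this
      by_cases h2 : ty = "bold"
      · subst h2
        have := ih ("\\textbf{" ++ p) text (c + 1)
        simp only [pvCloses] at this ⊢
        simp only [← String.append_assoc] at this ⊢
        exact this
      by_cases h3 : ty = "underline"
      · subst h3
        have := ih ("\\underline{" ++ p) text (c + 1)
        simp only [pvCloses] at this ⊢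
        simp only [← String.append_assoc] at this ⊢
        exact this
      by_cases h4 : ty = "subscript"
      · subst h4
        have := ih ("\\textsubscript{" ++ p) text (c + 1)
        simp only [pvCloses] at this ⊢
        simp only [← String.append_assoc] at this ⊢
        exact this
      by_cases h5 : ty = "superscript"
      · subst h5
        have := ih ("\\textsuperscript{" ++ p) text (c + 1)
        simp only [pvCloses] at this ⊢
        simp only [← String.append_assoc] at this ⊢
        exact this
      · have hc : pvCmds.get? ty = none := by
          have hmk : pvCmds = PySem.Dict.mk [("italic", "\\textit"), ("bold", "\\textbf"),
              ("underline", "\\underline"), ("subscript", "\\textsubscript"),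
              ("superscript", "\\textsuperscript")] := by decide
          rw [hmk]
          simp [PySem.Dict.get?, PySem.Dict.get?_mk_cons, Ne.symm h1, Ne.symm h2, Ne.symm h3, Ne.symm h4, Ne.symm h5]
        simp only [h1, h2, h3, h4, h5, if_false, hc]
        exact ih p text c

-- ===== VERDICT (by name: the statement is the Claim_ definition above) =====
theorem addMarkup_spec : Claim_equal_addMarkup := by
  intro text marks _ _
  unfold Spec_addMarkup addMarkup addMarkup_alt
  have := addMarkup_invariant marks "" text 0
  simpa [pvCloses] using this
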